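-- pv_equiv track=rewrite | github.com/Acoolguy25/CourseFinder | util.py | sub_get_last
-- ===== SOURCE A (Python) =====
-- def sub_get_last(value: str, search: str) -> int:
--     best = -1
--     while True:
--         attempt = value.find(search, best + 1)
--         if attempt == -1:
--             break
--         else:
--             best = attempt
--     return best
-- ===== SOURCE B (Python) =====
-- def sub_get_last(value: str, search: str) -> int:
--     i = len(value) - len(search)
--     while i >= 0:
--         if value[i:i + len(search)] == search:
--             return i
--         i -= 1
--     return -1
-- ===== Notes on version B (the rewrite author's own statement) =====
-- stated objective: alternative
-- what changed: Replaces the repeated forward find() loop (restarting after each hit) with a single right-to-left scan that returns the first matching position, i.e. the highest index, directly.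
import Mathlib
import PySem

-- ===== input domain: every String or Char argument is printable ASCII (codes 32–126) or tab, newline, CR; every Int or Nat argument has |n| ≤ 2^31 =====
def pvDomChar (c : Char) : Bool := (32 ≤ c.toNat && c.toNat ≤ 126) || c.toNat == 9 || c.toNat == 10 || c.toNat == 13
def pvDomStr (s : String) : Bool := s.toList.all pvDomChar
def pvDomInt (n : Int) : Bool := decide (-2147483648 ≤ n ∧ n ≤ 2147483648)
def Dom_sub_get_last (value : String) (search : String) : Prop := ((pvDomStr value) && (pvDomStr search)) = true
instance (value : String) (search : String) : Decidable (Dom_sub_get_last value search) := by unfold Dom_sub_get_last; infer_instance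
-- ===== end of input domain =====

-- B replaces A's repeated forward find() loop with a single right-to-left scan; equal value on every input (proved below).

-- ===== PORT A =====
-- A's 'while True' loop; the fuel only makes the same computation total (each
-- successful find strictly increases best, so value.length + 2 steps suffice).
def subGetLastLoop (value search : String) (fuel : Nat) (best : Int) : Int :=
  match fuel with
  | 0 => best
  | fuel + 1 =>
    let attempt := PySem.Str.findFrom value search (best + 1)
    if attempt = -1 then best
    else subGetLastLoop value search fuel attempt

def sub_get_last (value : String) (search : String) : Int :=
  subGetLastLoop value search (value.toList.length + 2) (-1)

-- ===== PORT B =====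
-- B's 'while i >= 0' countdown loop: test value[i:i+len(search)] == search, else i -= 1;
-- the i < 0 exit is the length test below (the loop body runs only for i ≥ 0).
def subGetLastAltGo (v s : List Char) : Nat → Int
  | 0 => if PySem.Chars.slice v (some ((0 : Nat) : Int)) (some (((0 : Nat) : Int) + (s.length : Int))) = s then ((0 : Nat) : Int) else -1
  | j + 1 =>
    if PySem.Chars.slice v (some ((j + 1 : Nat) : Int)) (some (((j + 1 : Nat) : Int) + (s.length : Int))) = s then ((j + 1 : Nat) : Int)
    else subGetLastAltGo v s j

def sub_get_last_alt (value : String) (search : String) : Int :=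
  let v := value.toList
  let s := search.toList
  if v.length < s.length then -1
  else subGetLastAltGo v s (v.length - s.length)

-- ===== PRECONDITION & SPEC =====
def Spec_sub_get_last (value : String) (search : String) (out : Int) : Prop := out = sub_get_last_alt value search
instance (value : String) (search : String) (out : Int) : Decidable (Spec_sub_get_last value search out) := by unfold Spec_sub_get_last; infer_instance

-- ===== CLAIM (what is proved, stated in full; the proofs are below) =====
def Claim_equal_sub_get_last : Prop := ∀ (value : String) (search : String), Dom_sub_get_last value search → Spec_sub_get_last value search (sub_get_last value search)

-- ===== LEMMAS AND PROOFS =====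

-- 'search occurs in v at index i'
def Occ (v s : List Char) (i : Nat) : Prop := s <+: v.drop i

-- 'r is the index of the last occurrence of s in v, or -1 if there is none'
def IsLast (v s : List Char) (r : Int) : Prop :=
  ((∀ i ≤ v.length, ¬ Occ v s i) ∧ r = -1) ∨
  (∃ k : Nat, r = (k : Int) ∧ k ≤ v.length ∧ Occ v s k ∧ ∀ i ≤ v.length, k < i → ¬ Occ v s i)

lemma isLast_unique {v s : List Char} {r₁ r₂ : Int}
    (h₁ : IsLast v s r₁) (h₂ : IsLast v s r₂) : r₁ = r₂ := by
  rcases h₁ with ⟨hn₁, e₁⟩ | ⟨k₁, e₁, hk₁, ho₁, hm₁⟩ <;>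
    rcases h₂ with ⟨hn₂, e₂⟩ | ⟨k₂, e₂, hk₂, ho₂, hm₂⟩
  · omega
  · exact absurd ho₂ (hn₁ k₂ hk₂)
  · exact absurd ho₁ (hn₂ k₁ hk₁)
  · rcases lt_trichotomy k₁ k₂ with h | h | h
    · exact absurd ho₂ (hm₁ k₂ hk₂ h)
    · omega
    · exact absurd ho₁ (hm₂ k₁ hk₁ h)

lemma slice_eq_iff (v s : List Char) (i : Nat) :
    (PySem.Chars.slice v (some (i : Int)) (some ((i : Int) + (s.length : Int))) = s) ↔ Occ v s i := by
  rw [PySem.Chars.slice_eq_listSlice, PySem.List.slice_natCast_add]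
  unfold Occ
  constructor
  · intro h; rw [← h]; exact List.take_prefix _ _
  · intro h; exact (List.prefix_iff_eq_take.mp h).symm

lemma subGetLastAltGo_isLast (v s : List Char) :
    ∀ i : Nat, i ≤ v.length → (∀ j ≤ v.length, i < j → ¬ Occ v s j) →
      IsLast v s (subGetLastAltGo v s i) := by
  intro i
  induction i with
  | zero =>
    intro h0 hno
    unfold subGetLastAltGo
    split_ifs with hc
    · exact Or.inr ⟨0, rfl, h0, (slice_eq_iff v s 0).mp hc, fun j hj h0j => hno j hj h0j⟩
    · refine Or.inl ⟨fun j hj hocc => ?_, rfl⟩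
      rcases Nat.eq_zero_or_pos j with rfl | hpos
      · exact (slice_eq_iff v s 0).not.mp hc hocc
      · exact hno j hj hpos hocc
  | succ j ih =>
    intro h0 hno
    unfold subGetLastAltGo
    split_ifs with hc
    · exact Or.inr ⟨j + 1, rfl, h0, (slice_eq_iff v s (j + 1)).mp hc, fun i hi hji => hno i hi hji⟩
    · refine ih (by omega) fun i hi hji => ?_
      rcases Nat.eq_or_lt_of_le (Nat.succ_le_of_lt hji) with h | h
      · exact h ▸ (slice_eq_iff v s (j + 1)).not.mp hc
      · exact hno i hi h

lemma alt_isLast (value search : String) :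
    IsLast value.toList search.toList (sub_get_last_alt value search) := by
  unfold sub_get_last_alt
  have hlb : value.toList.length = value.length := value.length_toList
  have hsb : search.toList.length = search.length := search.length_toList
  by_cases h : value.toList.length < search.toList.length
  · rw [if_pos h]
    refine Or.inl ⟨fun i hi hocc => ?_, rfl⟩
    have := hocc.length_le
    simp [List.length_drop] at this
    omega
  · rw [if_neg h]
    refine subGetLastAltGo_isLast _ _ _ (by omega) fun j hj hij hocc => ?_
    have := hocc.length_le
    simp [List.length_drop] at this
    omega

lemma occ_drop {v s : List Char} {k i : Nat} (hki : k ≤ i) (h : Occ v s i) :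
    s <+: (v.drop k).drop (i - k) := by
  have he : (v.drop k).drop (i - k) = v.drop i := by
    rw [List.drop_drop]; congr 1; omega
  rw [he]; exact h

lemma no_occ_of_find_neg {v s : List Char} {k : Nat}
    (h : PySem.Chars.find (v.drop k) s = -1) :
    ∀ i, k ≤ i → ¬ Occ v s i := by
  intro i hki hocc
  have hinf : s <:+: v.drop k := by
    rw [List.infix_iff_prefix_suffix]
    exact ⟨(v.drop k).drop (i - k), occ_drop hki hocc, List.drop_suffix _ _⟩
  exact (PySem.Chars.find_eq_neg_one_iff _ _).mp h hinf

lemma findFrom_past (s sub : List Char) (st : Int) (h : (s.length : Int) < st) :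
    PySem.Chars.findFrom s sub st none = -1 := by
  simp only [PySem.Chars.findFrom]
  split_ifs with h1 h2 <;> first | rfl | omega

lemma subGetLastLoop_isLast (value search : String) :
    ∀ (fuel : Nat) (best : Int),
      (best = -1 ∨ ∃ k : Nat, best = (k : Int) ∧ k ≤ value.toList.length ∧
        Occ value.toList search.toList k) →
      (value.toList.length : Int) - best < (fuel : Int) →
      IsLast value.toList search.toList (subGetLastLoop value search fuel best) := by
  intro fuel
  induction fuel with
  | zero =>
    intro best hinv hfuel
    exfalso
    rcases hinv with rfl | ⟨k, rfl, hk, _⟩ <;> omega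
  | succ fuel ih =>
    intro best hinv hfuel
    have hbest1 : -1 ≤ best := by rcases hinv with rfl | ⟨k, rfl, _, _⟩ <;> omega
    have hbestlen : best ≤ (value.toList.length : Int) := by
      rcases hinv with rfl | ⟨k, rfl, hk, _⟩ <;> omega
    have hlenbridge : value.toList.length = value.length := value.length_toList
    unfold subGetLastLoop
    rcases eq_or_lt_of_le hbestlen with heq | hlt
    · -- best = len (only possible via the invariant's Occ case): findFrom past the end
      have hpast : PySem.Str.findFrom value search (best + 1) = -1 := by
        rw [PySem.Str.findFrom_eq]
        exact findFrom_past _ _ _ (by omega)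
      rw [hpast]
      simp only [reduceIte]
      rcases hinv with rfl | ⟨k, rfl, hk, hocc⟩
      · omega
      · exact Or.inr ⟨k, rfl, hk, hocc, fun i hi hki => by omega⟩
    · -- best + 1 = k ≤ len
      obtain ⟨k, hkeq⟩ : ∃ k : Nat, best + 1 = (k : Int) :=
        ⟨(best + 1).toNat, by omega⟩
      have hkle : k ≤ value.toList.length := by omega
      have hff : PySem.Str.findFrom value search (best + 1) =
          (if PySem.Chars.find (value.toList.drop k) search.toList = -1 then -1
           else (k : Int) + PySem.Chars.find (value.toList.drop k) search.toList) := by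
        rw [PySem.Str.findFrom_eq, hkeq]
        exact PySem.Chars.findFrom_natCast _ _ k hkle
      rw [hff]
      by_cases hf : PySem.Chars.find (value.toList.drop k) search.toList = -1
      · rw [if_pos hf]
        simp only [reduceIte]
        have hno := no_occ_of_find_neg (v := value.toList) (s := search.toList) (k := k) hf
        rcases hinv with rfl | ⟨k₀, hb, hk₀, hocc⟩
        · exact Or.inl ⟨fun i hi => hno i (by omega), rfl⟩
        · exact Or.inr ⟨k₀, hb, hk₀, hocc, fun i hi hki => hno i (by omega)⟩
      · rw [if_neg hf]
        set f := PySem.Chars.find (value.toList.drop k) search.toList with hfdef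
        have hf0 : 0 ≤ f := by
          have := PySem.Chars.neg_one_le_find (value.toList.drop k) search.toList
          rw [← hfdef] at this; omega
        have hflen : f ≤ ((value.toList.drop k).length : Int) := by
          have := PySem.Chars.find_le_length (value.toList.drop k) search.toList
          rw [← hfdef] at this; exact_mod_cast this
        have hfspec := (PySem.Chars.find_spec (s := value.toList.drop k) (sub := search.toList) (by rw [← hfdef]; exact hf0)).1
        rw [← hfdef] at hfspec
        have hnneg : ¬ ((k : Int) + f = -1) := by omega
        rw [if_neg hnneg]
        refine ih ((k : Int) + f) (Or.inr ⟨k + f.toNat, by omega, ?_, ?_⟩) ?_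
        · simp [List.length_drop] at hflen ⊢; omega
        · unfold Occ
          have he : value.toList.drop (k + f.toNat) = (value.toList.drop k).drop f.toNat := by
            rw [List.drop_drop]
          rw [he]; exact hfspec
        · omega

-- ===== VERDICT (by name: the statement is the Claim_ definition above) =====
theorem sub_get_last_spec : Claim_equal_sub_get_last := by
  intro value search _
  unfold Spec_sub_get_last
  exact isLast_unique
    (subGetLastLoop_isLast value search _ (-1) (Or.inl rfl) (by push_cast; omega))
    (alt_isLast value search)
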